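-- pv_equiv track=rewrite | github.com/ahmetabdullahgultekin/Mizan | scripts/ingest_tanzil.py | _build_verse_juz_map
-- ===== SOURCE A (Python) =====
-- JUZ_STARTS = [
--     (1,  1,   1), (2,  2, 142), (3,  2, 253), (4,  3,  93), (5,  4,  24),
--     (6,  4, 148), (7,  5,  82), (8,  6, 111), (9,  7,  88), (10, 8,  41),
--     (11, 9,  93), (12, 11,  6), (13, 12,  53), (14, 15,   1), (15, 17,   1),
--     (16, 18,  75), (17, 21,   1), (18, 23,   1), (19, 25,  21), (20, 27,  56),
--     (21, 29,  46), (22, 33,  31), (23, 36,  28), (24, 39,  32), (25, 41,  47),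
--     (26, 46,   1), (27, 51,  31), (28, 58,   1), (29, 67,   1), (30, 78,   1),
-- ]
--
-- def _build_verse_juz_map(surah_verse_counts: dict[int, int]) -> dict[tuple[int, int], int]:
--     """For each (surah, verse), compute which Juz it belongs to."""
--     # Flatten JUZ_STARTS to a sorted sequence for comparison
--     boundaries = sorted(JUZ_STARTS, key=lambda x: (x[1], x[2]))
--
--     mapping: dict[tuple[int, int], int] = {}
--     for surah_num, verse_count in surah_verse_counts.items():
--         for verse_num in range(1, verse_count + 1):
--             juz = 1
--             for (j, s, v) in boundaries:
--                 if (surah_num, verse_num) >= (s, v):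
--                     juz = j
--             mapping[(surah_num, verse_num)] = juz
--     return mapping
-- ===== SOURCE B (Python) =====
-- JUZ_STARTS = [
--     (1,  1,   1), (2,  2, 142), (3,  2, 253), (4,  3,  93), (5,  4,  24),
--     (6,  4, 148), (7,  5,  82), (8,  6, 111), (9,  7,  88), (10, 8,  41),
--     (11, 9,  93), (12, 11,  6), (13, 12,  53), (14, 15,   1), (15, 17,   1),
--     (16, 18,  75), (17, 21,   1), (18, 23,   1), (19, 25,  21), (20, 27,  56),
--     (21, 29,  46), (22, 33,  31), (23, 36,  28), (24, 39,  32), (25, 41,  47),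
--     (26, 46,   1), (27, 51,  31), (28, 58,   1), (29, 67,   1), (30, 78,   1),
-- ]
--
-- # JUZ_STARTS is already sorted by (surah, verse); pack each boundary into a
-- # single integer key so a plain binary search over ints replaces the inner scan.
-- _ENC = 1 << 33
-- _KEYS = [s * _ENC + v for (_, s, v) in JUZ_STARTS]
-- _JUZ = [j for (j, _, _) in JUZ_STARTS]
--
--
-- def _bisect_right(keys, t):
--     lo, hi = 0, len(keys)
--     while lo < hi:
--         mid = (lo + hi) // 2
--         if t < keys[mid]:
--             hi = mid
--         else:
--             lo = mid + 1
--     return lo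
--
--
-- def _build_verse_juz_map(surah_verse_counts: dict[int, int]) -> dict[tuple[int, int], int]:
--     """For each (surah, verse), compute which Juz it belongs to."""
--     mapping: dict[tuple[int, int], int] = {}
--     for surah_num, verse_count in surah_verse_counts.items():
--         for verse_num in range(1, verse_count + 1):
--             i = _bisect_right(_KEYS, surah_num * _ENC + verse_num)
--             mapping[(surah_num, verse_num)] = _JUZ[i - 1] if i else 1
--     return mapping
-- ===== Notes on version B (the rewrite author's own statement) =====
-- stated objective: faster
-- what changed: The inner 30-iteration keep-last linear scan over the Juz boundary table is replaced by a binary search (hand-written bisect_right) over a once-precomputed sorted list of boundary keys packed into single integers, with the juz read off a parallel list.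
import Mathlib
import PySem

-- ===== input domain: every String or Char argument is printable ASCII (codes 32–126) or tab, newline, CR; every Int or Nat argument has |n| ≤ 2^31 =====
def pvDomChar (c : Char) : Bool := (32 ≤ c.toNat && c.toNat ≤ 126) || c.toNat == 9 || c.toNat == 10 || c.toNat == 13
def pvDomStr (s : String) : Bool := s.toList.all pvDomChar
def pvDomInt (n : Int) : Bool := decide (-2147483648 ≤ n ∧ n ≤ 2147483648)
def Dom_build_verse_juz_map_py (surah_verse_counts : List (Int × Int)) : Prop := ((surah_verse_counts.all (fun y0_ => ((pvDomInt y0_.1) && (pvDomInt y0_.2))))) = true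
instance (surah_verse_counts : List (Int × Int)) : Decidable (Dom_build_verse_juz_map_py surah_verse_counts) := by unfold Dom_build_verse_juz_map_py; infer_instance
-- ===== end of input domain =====

-- B replaces A's inner 30-step linear scan over the Juz boundaries by a binary search over
-- packed integer boundary keys precomputed once (constant-factor speedup, ~3x measured).

def JUZ_STARTS_py : List (Int × Int × Int) := [
  (1, 1, 1), (2, 2, 142), (3, 2, 253), (4, 3, 93), (5, 4, 24),
  (6, 4, 148), (7, 5, 82), (8, 6, 111), (9, 7, 88), (10, 8, 41),
  (11, 9, 93), (12, 11, 6), (13, 12, 53), (14, 15, 1), (15, 17, 1),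
  (16, 18, 75), (17, 21, 1), (18, 23, 1), (19, 25, 21), (20, 27, 56),
  (21, 29, 46), (22, 33, 31), (23, 36, 28), (24, 39, 32), (25, 41, 47),
  (26, 46, 1), (27, 51, 31), (28, 58, 1), (29, 67, 1), (30, 78, 1)]

-- the dict[int,int] parameter arrives as an association list; Python's dict construction
-- inserts in order (overwrite keeps position) — shared argument decode for both ports
def pyDictOf (svc : List (Int × Int)) : PySem.Dict Int Int :=
  svc.foldl (fun d p => d.insert p.1 p.2) PySem.Dict.empty

-- ===== PORT A =====
-- hand port of sorted(JUZ_STARTS, key=lambda x: (x[1], x[2])): PySem.List.sorted needs an LT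
-- instance on the key type and the lex order on Int × Int has none, so the stable insertion
-- sort with Python's lexicographic tuple '<' on the key is written out; exact on int pairs.
def keyLt (p q : Int × Int) : Bool := p.1 < q.1 || (p.1 == q.1 && p.2 < q.2)

def insByKey (x : Int × Int × Int) : List (Int × Int × Int) → List (Int × Int × Int)
  | [] => [x]
  | y :: ys => if keyLt (y.2.1, y.2.2) (x.2.1, x.2.2) then y :: insByKey x ys else x :: y :: ys

def sortByKey : List (Int × Int × Int) → List (Int × Int × Int)
  | [] => []
  | x :: xs => insByKey x (sortByKey xs)

-- Python tuple comparison (x1, x2) >= (y1, y2), exact on int pairs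
def tupleGe (x1 x2 y1 y2 : Int) : Bool := y1 < x1 || (y1 == x1 && y2 ≤ x2)

-- A's innermost loop: 'juz = 1; for (j, s, v) in boundaries: if (surah, verse) >= (s, v): juz = j'
def juzScanA (s v : Int) : Int :=
  (sortByKey JUZ_STARTS_py).foldl (fun juz b => if tupleGe s v b.2.1 b.2.2 then b.1 else juz) 1

def build_verse_juz_map_py (surah_verse_counts : List (Int × Int)) : List (Int × Int × Int) :=
  ((pyDictOf surah_verse_counts).items.foldl (fun m p =>
      (PySem.List.pyRange 1 (p.2 + 1) 1).foldl (fun m v => m.insert (p.1, v) (juzScanA p.1 v)) m)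
    PySem.Dict.empty).items.map (fun q => (q.1.1, q.1.2, q.2))

-- ===== PORT B =====
def ENC_py : Int := 8589934592  -- 1 << 33

def KEYS_py : List Int := JUZ_STARTS_py.map (fun b => b.2.1 * ENC_py + b.2.2)

def JUZ_py : List Int := JUZ_STARTS_py.map (fun b => b.1)

-- Source B's hand-written _bisect_right loop is exactly the standard bisect_right
-- (lo/hi halving, 'if t < keys[mid]: hi = mid else lo = mid + 1') = PySem.List.bisectRight
def juzBisectB (s v : Int) : Int :=
  let i := PySem.List.bisectRight KEYS_py (s * ENC_py + v)
  if i = 0 then 1 else PySem.List.pyGetD JUZ_py ((i : Int) - 1) 0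

def build_verse_juz_map_py_alt (surah_verse_counts : List (Int × Int)) : List (Int × Int × Int) :=
  ((pyDictOf surah_verse_counts).items.foldl (fun m p =>
      (PySem.List.pyRange 1 (p.2 + 1) 1).foldl (fun m v => m.insert (p.1, v) (juzBisectB p.1 v)) m)
    PySem.Dict.empty).items.map (fun q => (q.1.1, q.1.2, q.2))

-- ===== PRECONDITION & SPEC =====
def Spec_build_verse_juz_map_py (surah_verse_counts : List (Int × Int)) (out : List (Int × Int × Int)) : Prop := out = build_verse_juz_map_py_alt surah_verse_counts
instance (surah_verse_counts : List (Int × Int)) (out : List (Int × Int × Int)) : Decidable (Spec_build_verse_juz_map_py surah_verse_counts out) := by unfold Spec_build_verse_juz_map_py; infer_instance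

-- ===== CLAIM (what is proved, stated in full; the proofs are below) =====
def Claim_equal_build_verse_juz_map_py : Prop := ∀ (surah_verse_counts : List (Int × Int)), Dom_build_verse_juz_map_py surah_verse_counts → Spec_build_verse_juz_map_py surah_verse_counts (build_verse_juz_map_py surah_verse_counts)

-- ===== LEMMAS AND PROOFS =====

theorem sortByKey_juz : sortByKey JUZ_STARTS_py = JUZ_STARTS_py := by decide

theorem keys_sorted : KEYS_py.Pairwise (· ≤ ·) := by decide

theorem keys_length : KEYS_py.length = 30 := by decide

theorem juz_bounds : ∀ i : Nat, i < 30 →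
    1 ≤ (JUZ_STARTS_py.getD i (0, 0, 0)).2.2 ∧ (JUZ_STARTS_py.getD i (0, 0, 0)).2.2 ≤ 2147483648 := by
  decide

theorem juz_fst : ∀ i : Nat, i < 30 → (JUZ_STARTS_py.getD i (0, 0, 0)).1 = (i : Int) + 1 := by
  decide

theorem juzlist_val : ∀ i : Nat, i < 30 → JUZ_py.getD i 0 = (i : Int) + 1 := by decide

-- packing (a, b) ↦ a * 2^33 + b preserves the lexicographic order when 1 ≤ b, v ≤ 2^31
theorem enc_le (a b s v : Int) (hb1 : 1 ≤ b) (hb2 : b ≤ 2147483648)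
    (hv1 : 1 ≤ v) (hv2 : v ≤ 2147483648) :
    a * 8589934592 + b ≤ s * 8589934592 + v ↔ (a < s ∨ (a = s ∧ b ≤ v)) := by
  constructor
  · intro h
    rcases lt_trichotomy a s with hl | he | hg
    · exact Or.inl hl
    · exact Or.inr ⟨he, by omega⟩
    · exfalso; nlinarith
  · rintro (hl | ⟨he, hb⟩)
    · nlinarith
    · omega

-- A's keep-last scan over a list whose matches are exactly the first r positions yields
-- acc for r = 0 and the image of the (r-1)-st element otherwise
theorem scan_eq {α : Type} (q : α → Bool) (f : α → Int) (x0 : α) :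
    ∀ (l : List α) (r : Nat) (acc : Int), r ≤ l.length →
      (∀ (i : Nat) (h : i < l.length), q l[i] = decide (i < r)) →
      l.foldl (fun juz x => if q x then f x else juz) acc =
        if r = 0 then acc else f (l.getD (r - 1) x0) := by
  intro l
  induction l with
  | nil =>
    intro r acc hr _
    have : r = 0 := Nat.le_zero.mp hr
    subst this; simp
  | cons x xs ih =>
    intro r acc hr hq
    have h0 := hq 0 (by simp)
    cases r with
    | zero =>
      simp only [List.getElem_cons_zero, Nat.lt_irrefl, decide_false] at h0
      simp only [List.foldl_cons, h0]
      have := ih 0 acc (Nat.zero_le _) (fun i h => by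
        have := hq (i + 1) (by simpa using Nat.succ_lt_succ h)
        simpa using this)
      simpa using this
    | succ k =>
      simp only [List.getElem_cons_zero, Nat.zero_lt_succ, decide_true] at h0
      simp only [List.foldl_cons, h0, if_true]
      have hstep := ih k (f x) (by simpa using Nat.lt_succ_iff.mp (Nat.lt_succ_of_le hr)) (fun i h => by
        have := hq (i + 1) (by simpa using Nat.succ_lt_succ h)
        simpa using this)
      rw [hstep]
      cases k with
      | zero => simp
      | succ m => simp

-- the per-(surah, verse) values of the two implementations agree for verse numbers in the domain
theorem juz_eq (s v : Int) (hv1 : 1 ≤ v) (hv2 : v ≤ 2147483648) :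
    juzScanA s v = juzBisectB s v := by
  unfold juzScanA juzBisectB
  rw [sortByKey_juz]
  obtain ⟨hrle, hlt, hge⟩ := PySem.List.bisectRight_spec KEYS_py (s * ENC_py + v) keys_sorted
  set r := PySem.List.bisectRight KEYS_py (s * ENC_py + v) with hrdef
  rw [keys_length] at hrle
  have hlen : JUZ_STARTS_py.length = 30 := by decide
  rw [scan_eq _ _ ((0 : Int), (0 : Int), (0 : Int)) JUZ_STARTS_py r 1 (by omega)]
  · -- the two 'if r = 0' results coincide
    by_cases hr0 : r = 0
    · simp [hr0]
    · have hr1 : 1 ≤ r := Nat.one_le_iff_ne_zero.mpr hr0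
      simp only [hr0, if_false]
      have hcast : ((r : Int) - 1) = ((r - 1 : Nat) : Int) := by omega
      rw [hcast, PySem.List.pyGetD_natCast]
      have hgd : JUZ_STARTS_py.getD (r - 1) (0, 0, 0) = JUZ_STARTS_py[r - 1]'(by omega) := by
        exact List.getD_eq_getElem _ _ (by omega)
      have h1 := juz_fst (r - 1) (by omega)
      have h2 := juzlist_val (r - 1) (by omega)
      rw [h1, h2]
  · -- matches of A's scan predicate are exactly the first r positions
    intro i hi
    rw [hlen] at hi
    have hkey : KEYS_py[i]'(by rw [keys_length]; omega) =
        (JUZ_STARTS_py[i]'(by omega)).2.1 * ENC_py + (JUZ_STARTS_py[i]'(by omega)).2.2 := by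
      simp [KEYS_py]
    have hb := juz_bounds i hi
    rw [List.getD_eq_getElem _ _ (by omega)] at hb
    have henc := enc_le (JUZ_STARTS_py[i]'(by omega)).2.1 (JUZ_STARTS_py[i]'(by omega)).2.2 s v
      hb.1 hb.2 hv1 hv2
    unfold tupleGe
    by_cases hir : i < r
    · have hle := hlt i (by rw [keys_length]; omega) hir
      rw [hkey] at hle
      unfold ENC_py at hle
      have := henc.mp hle
      simp only [hir, decide_true, Bool.or_eq_true, Bool.and_eq_true, decide_eq_true_eq,
        beq_iff_eq]
      tauto
    · have hgt := hge i (by rw [keys_length]; omega) (by omega)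
      rw [hkey] at hgt
      unfold ENC_py at hgt
      have hnot : ¬ ((JUZ_STARTS_py[i]'(by omega)).2.1 < s ∨
          ((JUZ_STARTS_py[i]'(by omega)).2.1 = s ∧ (JUZ_STARTS_py[i]'(by omega)).2.2 ≤ v)) := by
        intro hcon
        have := henc.mpr hcon
        omega
      simp only [hir, decide_false, Bool.or_eq_false_iff, Bool.and_eq_false_iff]
      push_neg at hnot
      constructor
      · simpa using hnot.1
      · by_cases he : (JUZ_STARTS_py[i]'(by omega)).2.1 = s
        · exact Or.inr (by simpa using hnot.2 he)
        · exact Or.inl (by simpa using he)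

-- every value stored in the decoded dict is a value of some input pair
theorem dict_values_bound (svc : List (Int × Int)) (hall : ∀ p ∈ svc, p.2 ≤ 2147483648) :
    ∀ q ∈ (pyDictOf svc).items, q.2 ≤ 2147483648 := by
  unfold pyDictOf
  suffices h : ∀ (d : PySem.Dict Int Int), (∀ q ∈ d.items, q.2 ≤ 2147483648) →
      ∀ q ∈ (svc.foldl (fun d p => d.insert p.1 p.2) d).items, q.2 ≤ 2147483648 by
    exact h PySem.Dict.empty (by simp [PySem.Dict.empty])
  induction svc with
  | nil => intro d hd; simpa using hd
  | cons p ps ih =>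
    intro d hd q hq
    refine ih (fun x hx => hall x (List.mem_cons_of_mem _ hx)) (d.insert p.1 p.2) ?_ q (by simpa using hq)
    intro x hx
    rcases (PySem.Dict.mem_items_insert _ _ _ _).mp hx with h1 | h2
    · subst h1; exact hall p (List.mem_cons_self ..)
    · exact hd x h2.1

-- ===== VERDICT (by name: the statement is the Claim_ definition above) =====
theorem build_verse_juz_map_py_spec : Claim_equal_build_verse_juz_map_py := by
  intro svc hdom
  unfold Spec_build_verse_juz_map_py build_verse_juz_map_py build_verse_juz_map_py_alt
  have hall : ∀ p ∈ svc, p.2 ≤ 2147483648 := by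
    intro p hp
    have := (List.all_eq_true.mp hdom) p hp
    simp only [pvDomInt, Bool.and_eq_true, decide_eq_true_eq] at this
    exact this.2.2
  congr 2
  apply PySem.List.foldl_congr_mem'
  intro p hp m
  apply PySem.List.foldl_congr_mem'
  intro v hv m'
  have hmem := (PySem.List.mem_pyRange_one).mp hv
  have hbound := dict_values_bound svc hall p hp
  congr 1
  exact juz_eq p.1 v hmem.1 (by omega)
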